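-- pv_equiv track=rewrite | github.com/HanzoRazer/luthiers-toolbox | services/api/app/rmos/runs_v2/batch_summary.py | _rollup_risk
-- ===== SOURCE A (Python) =====
-- from typing import Any, Dict, List, Optional, Tuple
--
-- def _rollup_risk(risks: List[str]) -> Optional[str]:
--     """
--     Conservative rollup:
--       RED > YELLOW > GREEN
--     """
--     R = {r.upper() for r in risks if r}
--     if "RED" in R:
--         return "RED"
--     if "YELLOW" in R:
--         return "YELLOW"
--     if "GREEN" in R:
--         return "GREEN"
--     return None
-- ===== SOURCE B (Python) =====
-- def _rollup_risk(risks):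
--     """Single accumulator pass: track the best rank seen, break early on RED."""
--     best = 0
--     for r in risks:
--         if not r:
--             continue
--         u = r.upper()
--         rank = 3 if u == "RED" else 2 if u == "YELLOW" else 1 if u == "GREEN" else 0
--         if best < rank:
--             best = rank
--             if best == 3:
--                 break
--     if best == 3:
--         return "RED"
--     if best == 2:
--         return "YELLOW"
--     if best == 1:
--         return "GREEN"
--     return None
-- ===== Notes on version B (the rewrite author's own statement) =====
-- stated objective: alternative
-- what changed: Replaces the upper-cased set plus three ordered membership tests with a single fold keeping the maximum priority rank (with early exit on RED), mapped back to a label at the end.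
import Mathlib
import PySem

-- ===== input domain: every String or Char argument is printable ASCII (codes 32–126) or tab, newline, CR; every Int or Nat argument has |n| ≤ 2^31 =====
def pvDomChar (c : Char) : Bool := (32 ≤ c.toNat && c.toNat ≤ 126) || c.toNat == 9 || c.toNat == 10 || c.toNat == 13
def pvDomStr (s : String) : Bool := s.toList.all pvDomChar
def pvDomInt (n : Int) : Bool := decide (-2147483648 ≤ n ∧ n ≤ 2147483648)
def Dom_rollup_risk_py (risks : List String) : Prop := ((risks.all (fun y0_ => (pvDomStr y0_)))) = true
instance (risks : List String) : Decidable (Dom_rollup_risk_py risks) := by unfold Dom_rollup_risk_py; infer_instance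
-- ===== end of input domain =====

-- B replaces the set build + three ordered membership tests with one max-rank accumulator pass (alternative decomposition).

-- ===== PORT A =====
-- R = {r.upper() for r in risks if r}; then ordered membership tests
def rollup_risk_py (risks : List String) : Option String :=
  let R : PySem.Set String :=
    PySem.Set.ofList ((risks.filter (fun r => r ≠ "")).map PySem.Str.upper)
  if PySem.Set.contains R "RED" then some "RED"
  else if PySem.Set.contains R "YELLOW" then some "YELLOW"
  else if PySem.Set.contains R "GREEN" then some "GREEN"
  else none

-- ===== PORT B =====
-- rank of an (already upper-cased) string
def pvRankOf (u : String) : Nat :=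
  if u = "RED" then 3 else if u = "YELLOW" then 2 else if u = "GREEN" then 1 else 0

-- the loop of Source B: running maximum rank, early break when best = 3
def pvRollGo : List String → Nat → Nat
  | [], best => best
  | r :: rest, best =>
    if r = "" then pvRollGo rest best
    else
      let rank := pvRankOf (PySem.Str.upper r)
      if best < rank then
        if rank = 3 then rank else pvRollGo rest rank
      else pvRollGo rest best

def rollup_risk_py_alt (risks : List String) : Option String :=
  let best := pvRollGo risks 0
  if best = 3 then some "RED"
  else if best = 2 then some "YELLOW"
  else if best = 1 then some "GREEN"
  else none

-- ===== PRECONDITION & SPEC =====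
def Spec_rollup_risk_py (risks : List String) (out : Option String) : Prop := out = rollup_risk_py_alt risks
instance (risks : List String) (out : Option String) : Decidable (Spec_rollup_risk_py risks out) := by unfold Spec_rollup_risk_py; infer_instance

-- ===== CLAIM (what is proved, stated in full; the proofs are below) =====
def Claim_equal_rollup_risk_py : Prop := ∀ (risks : List String), Dom_rollup_risk_py risks → Spec_rollup_risk_py risks (rollup_risk_py risks)

-- ===== LEMMAS AND PROOFS =====

-- rank of an element of the input list (0 for the falsy empty string)
def pvRk (r : String) : Nat := if r = "" then 0 else pvRankOf (PySem.Str.upper r)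

-- maximum rank over the list
def pvMaxR (risks : List String) : Nat := risks.foldr (fun r m => max (pvRk r) m) 0

theorem pvRankOf_le (u : String) : pvRankOf u ≤ 3 := by
  unfold pvRankOf; split_ifs <;> omega

theorem pvRk_le (r : String) : pvRk r ≤ 3 := by
  unfold pvRk; split_ifs <;> first | omega | exact pvRankOf_le _

theorem pvMaxR_le (risks : List String) : pvMaxR risks ≤ 3 := by
  induction risks with
  | nil => simp [pvMaxR]
  | cons r rest ih =>
    simp only [pvMaxR, List.foldr] at *
    exact max_le (pvRk_le r) ih

theorem pvMaxR_cons (r : String) (rest : List String) :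
    pvMaxR (r :: rest) = max (pvRk r) (pvMaxR rest) := rfl

-- the loop computes max best (pvMaxR risks), given best ≤ 3
theorem pvRollGo_eq_max (risks : List String) : ∀ best, best ≤ 3 →
    pvRollGo risks best = max best (pvMaxR risks) := by
  induction risks with
  | nil => intro best _; simp [pvRollGo, pvMaxR]
  | cons r rest ih =>
    intro best hb
    rw [pvMaxR_cons]
    by_cases hr : r = ""
    · simp [pvRollGo, hr, pvRk, ih best hb]
    · simp only [pvRollGo, hr, if_false]
      have hrk : pvRk r = pvRankOf (PySem.Str.upper r) := by simp [pvRk, hr]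
      by_cases hlt : best < pvRankOf (PySem.Str.upper r)
      · simp only [if_pos hlt]
        by_cases h3 : pvRankOf (PySem.Str.upper r) = 3
        · simp only [if_pos h3]
          have := pvMaxR_le rest
          rw [hrk, h3]; omega
        · simp only [if_neg h3]
          rw [ih _ (pvRankOf_le _), hrk]
          omega
      · simp only [if_neg hlt]
        rw [ih best hb, hrk]
        omega

-- membership in A's set characterised by ranks
theorem pvMem_iff (risks : List String) (u : String) (hu : pvRankOf u ≠ 0) :
    (u ∈ (risks.filter (fun r => r ≠ "")).map PySem.Str.upper) ↔
      ∃ r ∈ risks, pvRk r = pvRankOf u := by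
  constructor
  · rintro h
    rw [List.mem_map] at h
    obtain ⟨r, hr, hru⟩ := h
    rw [List.mem_filter] at hr
    refine ⟨r, hr.1, ?_⟩
    have : r ≠ "" := by simpa using hr.2
    simp [pvRk, this, hru]
  · rintro ⟨r, hr, hrk⟩
    have hne : r ≠ "" := by
      intro h; rw [pvRk, if_pos h] at hrk; exact hu hrk.symm
    rw [pvRk, if_neg hne] at hrk
    have : PySem.Str.upper r = u := by
      revert hrk hu
      unfold pvRankOf
      split_ifs <;> intro _ h <;> simp_all
    rw [List.mem_map]
    exact ⟨r, List.mem_filter.mpr ⟨hr, by simpa using hne⟩, this⟩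

-- pvMaxR attains k (k ≠ 0) iff some element has rank ≥ achieving it
theorem pvLe_maxR_iff (risks : List String) (k : Nat) (hk : 0 < k) :
    k ≤ pvMaxR risks ↔ ∃ r ∈ risks, k ≤ pvRk r := by
  induction risks with
  | nil => simp [pvMaxR]; omega
  | cons r rest ih =>
    rw [pvMaxR_cons]
    simp only [List.mem_cons]
    constructor
    · intro h
      rcases le_max_iff.mp h with h1 | h2
      · exact ⟨r, Or.inl rfl, h1⟩
      · obtain ⟨s, hs, hks⟩ := ih.mp h2
        exact ⟨s, Or.inr hs, hks⟩
    · rintro ⟨s, hs | hs, hks⟩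
      · subst hs; exact le_max_of_le_left hks
      · exact le_max_of_le_right (ih.mpr ⟨s, hs, hks⟩)

-- rank k ≤ pvRk r is equivalent to an exact rank equality via membership; instead we relate directly:
theorem pvContains_iff (risks : List String) (u : String) (hu : pvRankOf u ≠ 0) :
    PySem.Set.contains
      (PySem.Set.ofList ((risks.filter (fun r => r ≠ "")).map PySem.Str.upper)) u = true ↔
      ∃ r ∈ risks, pvRk r = pvRankOf u := by
  rw [PySem.Set.contains_iff, PySem.Set.mem_ofList]
  exact pvMem_iff risks u hu

-- ===== VERDICT (by name: the statement is the Claim_ definition above) =====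
theorem rollup_risk_py_spec : Claim_equal_rollup_risk_py := by
  intro risks _
  unfold Spec_rollup_risk_py rollup_risk_py rollup_risk_py_alt
  rw [pvRollGo_eq_max risks 0 (by omega)]
  simp only [Nat.zero_max]
  have hM := pvMaxR_le risks
  have hR := pvContains_iff risks "RED" (by decide)
  have hY := pvContains_iff risks "YELLOW" (by decide)
  have hG := pvContains_iff risks "GREEN" (by decide)
  have hRv : pvRankOf "RED" = 3 := by decide
  have hYv : pvRankOf "YELLOW" = 2 := by decide
  have hGv : pvRankOf "GREEN" = 1 := by decide
  rw [hRv] at hR; rw [hYv] at hY; rw [hGv] at hG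
  -- translate exact-rank existence into pvMaxR comparisons
  have e3 : (∃ r ∈ risks, pvRk r = 3) ↔ 3 ≤ pvMaxR risks := by
    rw [pvLe_maxR_iff _ _ (by omega)]
    constructor
    · rintro ⟨r, hr, h⟩; exact ⟨r, hr, h.ge⟩
    · rintro ⟨r, hr, h⟩; exact ⟨r, hr, le_antisymm (pvRk_le r) h⟩
  have e2 : ¬(∃ r ∈ risks, pvRk r = 3) → ((∃ r ∈ risks, pvRk r = 2) ↔ 2 ≤ pvMaxR risks) := by
    intro hn3
    rw [pvLe_maxR_iff _ _ (by omega)]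
    constructor
    · rintro ⟨r, hr, h⟩; exact ⟨r, hr, h.ge⟩
    · rintro ⟨r, hr, h⟩
      refine ⟨r, hr, ?_⟩
      have := pvRk_le r
      by_contra hne
      exact hn3 ⟨r, hr, by omega⟩
  have e1 : ¬(∃ r ∈ risks, pvRk r = 3) → ¬(∃ r ∈ risks, pvRk r = 2) →
      ((∃ r ∈ risks, pvRk r = 1) ↔ 1 ≤ pvMaxR risks) := by
    intro hn3 hn2
    rw [pvLe_maxR_iff _ _ (by omega)]
    constructor
    · rintro ⟨r, hr, h⟩; exact ⟨r, hr, h.ge⟩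
    · rintro ⟨r, hr, h⟩
      refine ⟨r, hr, ?_⟩
      have := pvRk_le r
      by_contra hne
      rcases Nat.lt_or_ge (pvRk r) 3 with h3 | h3
      · exact hn2 ⟨r, hr, by omega⟩
      · exact hn3 ⟨r, hr, by omega⟩
  by_cases h3 : ∃ r ∈ risks, pvRk r = 3
  · have hm : pvMaxR risks = 3 := le_antisymm hM (e3.mp h3)
    rw [if_pos (hR.mpr h3), hm]
    norm_num
  · have hnot3 : ¬ 3 ≤ pvMaxR risks := fun h => h3 (e3.mpr h)
    rw [if_neg (fun h => h3 (hR.mp h))]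
    by_cases h2 : ∃ r ∈ risks, pvRk r = 2
    · have hm2 : pvMaxR risks = 2 := by have := (e2 h3).mp h2; omega
      rw [if_pos (hY.mpr h2), hm2]
      norm_num
    · have hnot2 : ¬ 2 ≤ pvMaxR risks := fun h => h2 ((e2 h3).mpr h)
      rw [if_neg (fun h => h2 (hY.mp h))]
      by_cases h1 : ∃ r ∈ risks, pvRk r = 1
      · have hm1 : pvMaxR risks = 1 := by have := (e1 h3 h2).mp h1; omega
        rw [if_pos (hG.mpr h1), hm1]
        norm_num
      · have hnot1 : ¬ 1 ≤ pvMaxR risks := fun h => h1 ((e1 h3 h2).mpr h)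
        have hm0 : pvMaxR risks = 0 := by omega
        rw [if_neg (fun h => h1 (hG.mp h)), hm0]
        norm_num
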